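-- pv_equiv track=rewrite | github.com/0xunderl0rd/AI4H-DoomGen | local-doomgen-service/app/main.py | infer_weapon_theme_effect
-- ===== SOURCE A (Python) =====
-- def infer_weapon_theme_effect(brief: str, visual_concept: str) -> str:
--     normalized = f"{brief} {visual_concept}".lower()
--     if any(token in normalized for token in ("burger", "hamburger", "sandwich", "pizza", "taco", "food", "meat", "ketchup", "mustard")):
--         return "food_emission"
--     if any(token in normalized for token in ("bubble", "foam", "soap")):
--         return "bubble_emission"
--     if any(token in normalized for token in ("fish", "water", "ocean", "aquatic", "splash")):
--         return "water_emission"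
--     if any(token in normalized for token in ("shrimp", "prawn", "crab", "lobster", "shellfish")):
--         return "water_emission"
--     if any(token in normalized for token in ("magic", "sparkle", "candy", "star", "crystal")):
--         return "sparkle_emission"
--     return "impact_emission"
-- ===== SOURCE B (Python) =====
-- _GROUPS = (
--     ("burger", "hamburger", "sandwich", "pizza", "taco", "food", "meat", "ketchup", "mustard"),
--     ("bubble", "foam", "soap"),
--     ("fish", "water", "ocean", "aquatic", "splash"),
--     ("shrimp", "prawn", "crab", "lobster", "shellfish"),
--     ("magic", "sparkle", "candy", "star", "crystal"),
-- )
-- _LABELS = ("food_emission", "bubble_emission", "water_emission", "water_emission",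
--            "sparkle_emission", "impact_emission")
-- _TOKEN_RANK = {t: r for r, group in enumerate(_GROUPS) for t in group}
--
-- def infer_weapon_theme_effect(brief: str, visual_concept: str) -> str:
--     normalized = (brief + " " + visual_concept).lower()
--     best = min((r for t, r in _TOKEN_RANK.items() if t in normalized), default=len(_GROUPS))
--     return _LABELS[best]
-- ===== Notes on version B (the rewrite author's own statement) =====
-- stated objective: alternative
-- what changed: Replaces the early-exit if-chain with a flat token-to-rank map scanned exhaustively: B computes the minimum rank over all matching tokens (no short-circuit) and selects the label by indexing a table with that rank.
import Mathlib
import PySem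

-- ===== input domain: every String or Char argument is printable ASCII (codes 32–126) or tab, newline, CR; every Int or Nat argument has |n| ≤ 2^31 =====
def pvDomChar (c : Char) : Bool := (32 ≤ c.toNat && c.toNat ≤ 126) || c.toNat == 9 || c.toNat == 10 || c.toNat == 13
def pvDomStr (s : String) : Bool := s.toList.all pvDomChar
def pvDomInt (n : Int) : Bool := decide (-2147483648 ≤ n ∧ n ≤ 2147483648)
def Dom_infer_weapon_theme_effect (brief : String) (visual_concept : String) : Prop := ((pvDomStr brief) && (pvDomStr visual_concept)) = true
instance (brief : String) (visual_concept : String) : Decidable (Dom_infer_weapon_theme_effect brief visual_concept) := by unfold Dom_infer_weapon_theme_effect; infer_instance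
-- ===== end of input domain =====

-- B replaces A's early-exit if-chain by an exhaustive min-rank scan of a flat token→rank map plus label-table indexing (alternative structure; same cost).


-- ===== PORT A =====
def infer_weapon_theme_effect (brief : String) (visual_concept : String) : String :=
  let normalized := PySem.Str.lower (brief ++ " " ++ visual_concept)
  if (["burger", "hamburger", "sandwich", "pizza", "taco", "food", "meat", "ketchup", "mustard"].any (fun token => PySem.Str.isIn token normalized)) then "food_emission"
  else if (["bubble", "foam", "soap"].any (fun token => PySem.Str.isIn token normalized)) then "bubble_emission"
  else if (["fish", "water", "ocean", "aquatic", "splash"].any (fun token => PySem.Str.isIn token normalized)) then "water_emission"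
  else if (["shrimp", "prawn", "crab", "lobster", "shellfish"].any (fun token => PySem.Str.isIn token normalized)) then "water_emission"
  else if (["magic", "sparkle", "candy", "star", "crystal"].any (fun token => PySem.Str.isIn token normalized)) then "sparkle_emission"
  else "impact_emission"

-- ===== PORT B =====
-- the keyword groups, in priority order (Source B: _GROUPS)
def pvGroups : List (List String) :=
  [["burger", "hamburger", "sandwich", "pizza", "taco", "food", "meat", "ketchup", "mustard"],
   ["bubble", "foam", "soap"],
   ["fish", "water", "ocean", "aquatic", "splash"],
   ["shrimp", "prawn", "crab", "lobster", "shellfish"],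
   ["magic", "sparkle", "candy", "star", "crystal"]]

-- label selected per rank; rank 5 = no token matched (Source B: _LABELS)
def pvLabels : List String :=
  ["food_emission", "bubble_emission", "water_emission", "water_emission",
   "sparkle_emission", "impact_emission"]

-- the flat token → rank map built from the groups (Source B: _TOKEN_RANK)
def pvTokenRank : List (String × Nat) :=
  pvGroups.zipIdx.flatMap (fun gr => gr.1.map (fun t => (t, gr.2)))

-- Source B: min over the ranks of all matching tokens, default = number of groups
def infer_weapon_theme_effect_alt (brief : String) (visual_concept : String) : String :=
  let normalized := PySem.Str.lower (brief ++ " " ++ visual_concept)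
  let best := pvTokenRank.foldl
    (fun acc tr => if PySem.Str.isIn tr.1 normalized then min acc tr.2 else acc)
    pvGroups.length
  pvLabels.getD best "impact_emission"

-- ===== PRECONDITION & SPEC =====
def Spec_infer_weapon_theme_effect (brief : String) (visual_concept : String) (out : String) : Prop := out = infer_weapon_theme_effect_alt brief visual_concept
instance (brief : String) (visual_concept : String) (out : String) : Decidable (Spec_infer_weapon_theme_effect brief visual_concept out) := by unfold Spec_infer_weapon_theme_effect; infer_instance

-- ===== CLAIM (what is proved, stated in full; the proofs are below) =====
def Claim_equal_infer_weapon_theme_effect : Prop := ∀ (brief : String) (visual_concept : String), Dom_infer_weapon_theme_effect brief visual_concept → Spec_infer_weapon_theme_effect brief visual_concept (infer_weapon_theme_effect brief visual_concept)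

-- ===== LEMMAS AND PROOFS =====

-- folding the min-rank step over one group's segment (all tokens of rank r)
theorem pv_fold_segment (ts : List String) (r a : Nat) (n : String) :
    (ts.map (fun t => (t, r))).foldl
      (fun acc tr => if PySem.Str.isIn tr.1 n then min acc tr.2 else acc) a
    = if ts.any (fun t => PySem.Str.isIn t n) then min a r else a := by
  induction ts generalizing a with
  | nil => simp
  | cons t ts ih =>
    simp only [PySem.Str.isIn] at ih ⊢
    by_cases h : PySem.Chars.isIn t.toList n.toList = true
    · simp [h, ih, min_assoc]
    · simp [h, ih]

-- ===== VERDICT (by name: the statement is the Claim_ definition above) =====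
theorem infer_weapon_theme_effect_spec : Claim_equal_infer_weapon_theme_effect := by
  intro brief visual_concept _
  unfold Spec_infer_weapon_theme_effect infer_weapon_theme_effect infer_weapon_theme_effect_alt
  simp only [pvTokenRank, pvGroups, List.zipIdx, List.flatMap_cons, List.flatMap_nil,
    List.append_nil, List.foldl_append, pv_fold_segment, List.length_cons, List.length_nil]
  split_ifs <;> rfl
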